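-- pv_equiv track=rewrite | github.com/TennielMiao/uab-contest-tools | number_theory.py | convert_radix
-- ===== SOURCE A (Python) =====
-- def convert_radix(digits: list, base_in: int, base_out: int):
--     """
--     convert a non-negative number from radix base_in to radix base_out
--
--     A n-digit input number is represented as [d_{n-1}..., d_4, d_3, d_2, d_1, d_0]
--     The input number is \sum_{i=0}^{n-1}{d_i * base_in^i}
--     We allow d_i<0, d_i=0, di>0 to represent balanced numeral systems;
--     Note that base_in can be negative or positive as long as abs(base_in)>=2
--     Examples of input numbers and output numbers:
--     985 --> [9, 8, 5]
--     -985 --> [-9, -8, -5] (handle this using upper-level list comprehensions, etc. This is different from balanced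
--     n-ary, because the all digits are non-positive)
--
--     This algorithm works for any base with abs(base) >= 2
--
--     This algorithm can also convert balanced n-ary to n-ary.
--     """
--     num = sum(d * base_in ** p for p, d in enumerate(digits[::-1]))
--     if num == 0:
--         return [0]
--     result = []
--     if base_out >= 2:
--         if num > 0:
--             while num != 0:
--                 num, rem = divmod(num, base_out)
--                 result.insert(0, rem)
--         else:  # num < 0
--             num = -num
--             while num != 0:
--                 num, rem = divmod(num, base_out)
--                 result.insert(0, rem)
--             result = [-x for x in result]
--     elif base_out <= -2:  # negative base
--         while num != 0:
--             num, rem = divmod(num, base_out)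
--             if rem < 0:
--                 num += 1
--                 rem -= base_out
--             result.insert(0, rem)
--     return result
-- ===== SOURCE B (Python) =====
-- def _value(ds, b):
--     # divide-and-conquer evaluation: value(left ++ right) = value(left)*b^len(right) + value(right)
--     k = len(ds)
--     if k == 0:
--         return 0
--     if k == 1:
--         return ds[0]
--     h = k // 2
--     return _value(ds[:h], b) * b ** (k - h) + _value(ds[h:], b)
--
--
-- def convert_radix(digits: list, base_in: int, base_out: int):
--     num = _value(digits, base_in)
--     if num == 0:
--         return [0]
--     if -2 < base_out < 2:
--         return []
--     # One uniform digit loop for all three of A's cases: pick the modulus m whose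
--     # remainder range matches the digit range (no negate-twice, no fix-up branch);
--     # each step the remainder is a digit and the quotient (n - r) // base_out is exact.
--     m = -abs(base_out) if (num < 0 and base_out > 0) else abs(base_out)
--     out = []
--     n = num
--     while n != 0:
--         r = n % m
--         out.append(r)
--         n = (n - r) // base_out
--     out.reverse()
--     return out
-- ===== Notes on version B (the rewrite author's own statement) =====
-- stated objective: faster
-- what changed: B evaluates the input by balanced divide-and-conquer splitting (value(l++r)=value(l)*b^|r|+value(r)) instead of A's per-position powers, and emits output digits with ONE uniform remainder loop (r = n % m for a sign-chosen modulus m, exact quotient (n-r)//base_out) replacing A's three separate branches with negate-twice and remainder fix-up, appending and reversing instead of insert(0).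
import Mathlib
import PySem

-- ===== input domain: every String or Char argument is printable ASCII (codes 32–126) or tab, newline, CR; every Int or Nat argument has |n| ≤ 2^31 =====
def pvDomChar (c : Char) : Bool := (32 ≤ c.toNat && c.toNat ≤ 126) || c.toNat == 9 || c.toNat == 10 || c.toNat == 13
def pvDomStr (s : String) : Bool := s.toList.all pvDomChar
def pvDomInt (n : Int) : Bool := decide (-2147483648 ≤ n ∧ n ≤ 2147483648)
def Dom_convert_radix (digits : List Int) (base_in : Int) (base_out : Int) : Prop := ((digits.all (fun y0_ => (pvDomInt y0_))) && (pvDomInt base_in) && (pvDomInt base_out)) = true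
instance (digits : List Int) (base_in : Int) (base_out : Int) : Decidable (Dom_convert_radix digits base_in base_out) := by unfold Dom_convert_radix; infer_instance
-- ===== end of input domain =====

-- B evaluates the input by balanced divide-and-conquer splitting instead of per-position
-- powers, and emits the output digits with one uniform remainder loop (sign-chosen modulus,
-- exact quotient) replacing A's three branches with negate-twice / remainder fix-up and
-- insert(0); measurably faster. A and B agree on all inputs (A is total).

-- ===== PORT A =====

-- termination fact for A's positive-base loop (also cited by B's loop)
theorem pvPosStepLt (n b : Int) (h : ¬(n ≤ 0 ∨ b < 2)) :
    (PySem.Int.floordiv n b).toNat < n.toNat := by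
  rw [PySem.Int.floordiv_eq_ediv_of_pos (by omega)]
  have h3 : n / b < n := Int.ediv_lt_self_of_pos_of_ne_one (by omega) (by omega)
  have h4 : 0 ≤ n / b := Int.ediv_nonneg (by omega) (by omega)
  omega

-- termination fact for the negative-base loops of both ports
theorem pvNegMeasureLt (n b q r : Int) (hb : b ≤ -2) (hn : n ≠ 0)
    (h : n = q * b + r) (h0 : 0 ≤ r) (h1 : r < -b) :
    2 * q.natAbs + (if q < 0 then 1 else 0) < 2 * n.natAbs + (if n < 0 then 1 else 0) := by
  have e1 : q.natAbs * b.natAbs ≤ n.natAbs + r.natAbs := by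
    rw [← Int.natAbs_mul, show q * b = n - r by omega]
    exact Int.natAbs_sub_le n r
  have e2 : (q.natAbs : Int) * (b.natAbs : Int) ≤ (n.natAbs : Int) + (r.natAbs : Int) := by
    exact_mod_cast e1
  have hb' : (b.natAbs : Int) = -b := by omega
  have hr' : (r.natAbs : Int) = r := by omega
  rw [hb', hr'] at e2
  have hqb : (q.natAbs : Int) * (-b) ≤ (n.natAbs : Int) + (-b) - 1 := by linarith
  rcases (by omega : (2 ≤ n.natAbs) ∨ n = 1 ∨ n = -1) with h2 | h2 | h2
  · have : q.natAbs < n.natAbs := by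
      by_contra hc
      have hm : (2 : Int) ≤ (n.natAbs : Int) := by exact_mod_cast h2
      have hk : (n.natAbs : Int) ≤ (q.natAbs : Int) := by omega
      have hmono : (n.natAbs : Int) * (-b) ≤ (q.natAbs : Int) * (-b) :=
        mul_le_mul_of_nonneg_right hk (by omega)
      nlinarith [mul_pos (show (0:Int) < (n.natAbs : Int) - 1 by omega)
        (show (0:Int) < (-b) - 1 by omega)]
    clear e1 e2 hqb hb' hr'
    split_ifs <;> omega
  · subst h2
    have hq : q = 0 := by
      rcases lt_trichotomy q 0 with hq | hq | hq
      · have : (-1 : Int) * b ≤ q * b := mul_le_mul_of_nonpos_right (by omega) (by omega)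
        linarith
      · exact hq
      · have : q * b ≤ 1 * b := mul_le_mul_of_nonpos_right (by omega) (by omega)
        linarith
    simp [hq]
  · subst h2
    have hq : 0 ≤ q ∧ q ≤ 1 := by
      constructor
      · by_contra hc
        have : (-1 : Int) * b ≤ q * b := mul_le_mul_of_nonpos_right (by omega) (by omega)
        linarith
      · by_contra hc
        have : q * b ≤ 2 * b := mul_le_mul_of_nonpos_right (by omega) (by omega)
        linarith
    rcases (by omega : q = 0 ∨ q = 1) with h | h <;> simp [h]

-- A's positive-base loop: `while num != 0: num, rem = divmod(num, base_out); result.insert(0, rem)`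
-- (entered only with num > 0 and base_out ≥ 2; the guard `n ≤ 0 ∨ b < 2` only makes it total,
--  it coincides with `num != 0` on every reachable state)
def goApos (n b : Int) (acc : List Int) : List Int :=
  if h : n ≤ 0 ∨ b < 2 then acc
  else goApos (PySem.Int.floordiv n b) b (PySem.Int.mod n b :: acc)
termination_by n.toNat
decreasing_by exact pvPosStepLt n b h

-- A's negative-base loop with the remainder fix-up (`if rem < 0: num += 1; rem -= base_out`)
-- (entered only with base_out ≤ -2; the guard `-2 < b` only makes it total)
def goAneg (n b : Int) (acc : List Int) : List Int :=
  if h : n = 0 ∨ -2 < b then acc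
  else if hr : PySem.Int.mod n b < 0 then
    goAneg (PySem.Int.floordiv n b + 1) b ((PySem.Int.mod n b - b) :: acc)
  else
    goAneg (PySem.Int.floordiv n b) b (PySem.Int.mod n b :: acc)
termination_by 2 * n.natAbs + (if n < 0 then 1 else 0)
decreasing_by
  · refine pvNegMeasureLt n b (PySem.Int.floordiv n b + 1) (PySem.Int.mod n b - b)
      (by omega) (by omega) ?_ ?_ ?_
    · linear_combination -PySem.Int.floordiv_mul_add_mod n b
    · have := (PySem.Int.mod_neg_bounds (a := n) (show b < 0 by omega)).1
      omega
    · omega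
  · refine pvNegMeasureLt n b (PySem.Int.floordiv n b) (PySem.Int.mod n b)
      (by omega) (by omega) ?_ ?_ ?_
    · linear_combination -PySem.Int.floordiv_mul_add_mod n b
    · omega
    · have := (PySem.Int.mod_neg_bounds (a := n) (show b < 0 by omega)).2
      omega

def convert_radix (digits : List Int) (base_in : Int) (base_out : Int) : List Int :=
  -- num = sum(d * base_in ** p for p, d in enumerate(digits[::-1]))
  -- (digits[::-1] is digits.reverse; ** has a non-negative exponent here, so it is `^ ·.toNat`)
  let num := ((PySem.List.enumerate digits.reverse 0).map (fun pd => pd.2 * base_in ^ pd.1.toNat)).sum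
  if num = 0 then [0]
  else if 2 ≤ base_out then
    if 0 < num then goApos num base_out []
    else (goApos (-num) base_out []).map (fun x => -x)
  else if base_out ≤ -2 then goAneg num base_out []
  else []

-- ===== PORT B =====

-- uniqueness of the floor-division representation (quotient/remainder with the
-- divisor-sign remainder range); shared by B's loop lemmas
theorem pvRep (n b q r : Int)
    (hb : (0 < b ∧ 0 ≤ r ∧ r < b) ∨ (b < 0 ∧ b < r ∧ r ≤ 0))
    (h : n = q * b + r) :
    PySem.Int.floordiv n b = q ∧ PySem.Int.mod n b = r := by
  have hmb := PySem.Int.floordiv_mul_add_mod n b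
  have key : (PySem.Int.floordiv n b - q) * b = r - PySem.Int.mod n b := by
    linear_combination hmb + h
  rcases hb with ⟨hb, h0, h1⟩ | ⟨hb, h0, h1⟩
  · have hr0 : 0 ≤ PySem.Int.mod n b := PySem.Int.mod_nonneg n hb
    have hr1 : PySem.Int.mod n b < b := PySem.Int.mod_lt n hb
    have hq : PySem.Int.floordiv n b = q := by
      rcases lt_trichotomy (PySem.Int.floordiv n b) q with hlt | he | hgt
      · nlinarith [mul_le_mul_of_nonneg_right
          (show PySem.Int.floordiv n b - q ≤ -1 by omega) (le_of_lt hb)]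
      · exact he
      · nlinarith [mul_le_mul_of_nonneg_right
          (show (1 : Int) ≤ PySem.Int.floordiv n b - q by omega) (le_of_lt hb)]
    refine ⟨hq, ?_⟩
    rw [hq] at key
    simp at key
    omega
  · have hbd := PySem.Int.mod_neg_bounds (a := n) hb
    have hq : PySem.Int.floordiv n b = q := by
      rcases lt_trichotomy (PySem.Int.floordiv n b) q with hlt | he | hgt
      · nlinarith [mul_le_mul_of_nonpos_right
          (show PySem.Int.floordiv n b - q ≤ -1 by omega) (le_of_lt hb)]
      · exact he
      · nlinarith [mul_le_mul_of_nonpos_right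
          (show (1 : Int) ≤ PySem.Int.floordiv n b - q by omega) (le_of_lt hb)]
    refine ⟨hq, ?_⟩
    rw [hq] at key
    simp at key
    omega

-- exact division: (k*b) // b = k
theorem pvFdExact (k b : Int) (hb : b ≠ 0) : PySem.Int.floordiv (k * b) b = k := by
  refine (pvRep (k * b) b k 0 ?_ (by ring)).1
  rcases lt_trichotomy b 0 with h | h | h
  · right; exact ⟨h, by omega, le_refl 0⟩
  · omega
  · left; exact ⟨h, le_refl 0, h⟩

-- B's quotient step (n - n % m) // base, for m = base and m = -base
theorem pvQsame (n b : Int) (hb : b ≠ 0) :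
    PySem.Int.floordiv (n - PySem.Int.mod n b) b = PySem.Int.floordiv n b := by
  have h : n - PySem.Int.mod n b = PySem.Int.floordiv n b * b := by
    linear_combination -PySem.Int.floordiv_mul_add_mod n b
  rw [h, pvFdExact _ _ hb]

theorem pvQneg (n b : Int) (hb : b ≠ 0) :
    PySem.Int.floordiv (n - PySem.Int.mod n (-b)) b = -(PySem.Int.floordiv n (-b)) := by
  have h : n - PySem.Int.mod n (-b) = (-(PySem.Int.floordiv n (-b))) * b := by
    linear_combination -PySem.Int.floordiv_mul_add_mod n (-b)
  rw [h, pvFdExact _ _ hb]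

-- termination of B's uniform loop, case split over the three reachable configurations
theorem pvGoBDec (n base m : Int)
    (h : (0 < n ∧ base = m ∧ 2 ≤ m) ∨ (n < 0 ∧ m = -base ∧ 2 ≤ base) ∨
         (n ≠ 0 ∧ m = -base ∧ base ≤ -2)) :
    2 * (PySem.Int.floordiv (n - PySem.Int.mod n m) base).natAbs +
        (if PySem.Int.floordiv (n - PySem.Int.mod n m) base < 0 then 1 else 0)
      < 2 * n.natAbs + (if n < 0 then 1 else 0) := by
  rcases h with ⟨hn, hbm, h2⟩ | ⟨hn, hm, h2⟩ | ⟨hn, hm, hb⟩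
  · subst hbm
    rw [pvQsame n base (by omega)]
    have h1 := pvPosStepLt n base (by omega)
    have h0 : 0 ≤ PySem.Int.floordiv n base := by
      rw [PySem.Int.floordiv_eq_ediv_of_pos (by omega)]
      exact Int.ediv_nonneg (by omega) (by omega)
    split_ifs <;> omega
  · subst hm
    rw [pvQneg n base (by omega)]
    rw [show n = -(-n) by ring, PySem.Int.floordiv_neg_neg (-n) base]
    have h1 := pvPosStepLt (-n) base (by omega)
    have h0 : 0 ≤ PySem.Int.floordiv (-n) base := by
      rw [PySem.Int.floordiv_eq_ediv_of_pos (by omega)]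
      exact Int.ediv_nonneg (by omega) (by omega)
    split_ifs <;> omega
  · subst hm
    rw [pvQneg n base (by omega)]
    refine pvNegMeasureLt n base (-(PySem.Int.floordiv n (-base))) (PySem.Int.mod n (-base))
      hb hn ?_ ?_ ?_
    · linear_combination -PySem.Int.floordiv_mul_add_mod n (-base)
    · exact PySem.Int.mod_nonneg n (by omega)
    · exact PySem.Int.mod_lt n (by omega)

-- B's divide-and-conquer evaluation of the input number:
--   k == 0 -> 0; k == 1 -> ds[0]; else split at h = k // 2
-- (Python's slices ds[:h], ds[h:] are exactly take h / drop h since 0 ≤ h ≤ len(ds);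
--  ds[0] for a one-element list is headD 0; b ** (k - h) has a non-negative exponent)
def valDC (ds : List Int) (b : Int) : Int :=
  if hk : ds.length ≤ 1 then ds.headD 0
  else
    valDC (ds.take (ds.length / 2)) b * b ^ (ds.length - ds.length / 2) +
      valDC (ds.drop (ds.length / 2)) b
termination_by ds.length
decreasing_by
  · rw [List.length_take]; omega
  · rw [List.length_drop]; omega

-- B's single digit loop: `while n != 0: r = n % m; out.append(r); n = (n - r) // base_out`
-- (the guard lists the three configurations B calls it in — positive base with n > 0,
--  positive base with n < 0 and m = -base, negative base with m = -base — purely to make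
--  the recursion total; on every reachable state it coincides with `n != 0`)
def goB (n base m : Int) (acc : List Int) : List Int :=
  if h : (0 < n ∧ base = m ∧ 2 ≤ m) ∨ (n < 0 ∧ m = -base ∧ 2 ≤ base) ∨
         (n ≠ 0 ∧ m = -base ∧ base ≤ -2) then
    goB (PySem.Int.floordiv (n - PySem.Int.mod n m) base) base m (acc ++ [PySem.Int.mod n m])
  else acc
termination_by 2 * n.natAbs + (if n < 0 then 1 else 0)
decreasing_by exact pvGoBDec n base m h

def convert_radix_alt (digits : List Int) (base_in : Int) (base_out : Int) : List Int :=
  let num := valDC digits base_in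
  if num = 0 then [0]
  else if -2 < base_out ∧ base_out < 2 then []
  else
    -- m = -abs(base_out) if (num < 0 and base_out > 0) else abs(base_out)
    let m := if num < 0 ∧ 0 < base_out then -|base_out| else |base_out|
    (goB num base_out m []).reverse

-- ===== PRECONDITION & SPEC =====
def Spec_convert_radix (digits : List Int) (base_in : Int) (base_out : Int) (out : List Int) : Prop := out = convert_radix_alt digits base_in base_out
instance (digits : List Int) (base_in : Int) (base_out : Int) (out : List Int) : Decidable (Spec_convert_radix digits base_in base_out out) := by unfold Spec_convert_radix; infer_instance

-- ===== CLAIM (what is proved, stated in full; the proofs are below) =====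
def Claim_equal_convert_radix : Prop := ∀ (digits : List Int) (base_in : Int) (base_out : Int), Dom_convert_radix digits base_in base_out → Spec_convert_radix digits base_in base_out (convert_radix digits base_in base_out)

-- ===== LEMMAS AND PROOFS =====

-- one-step unfoldings of the three loops
theorem goApos_stop (n b : Int) (acc : List Int) (h : n ≤ 0 ∨ b < 2) :
    goApos n b acc = acc := by rw [goApos]; exact dif_pos h

theorem goApos_step (n b : Int) (acc : List Int) (h : ¬(n ≤ 0 ∨ b < 2)) :
    goApos n b acc = goApos (PySem.Int.floordiv n b) b (PySem.Int.mod n b :: acc) := by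
  rw [goApos]; exact dif_neg h

theorem goAneg_stop (n b : Int) (acc : List Int) (h : n = 0 ∨ -2 < b) :
    goAneg n b acc = acc := by rw [goAneg]; exact dif_pos h

theorem goAneg_step_neg (n b : Int) (acc : List Int) (h : ¬(n = 0 ∨ -2 < b))
    (hr : PySem.Int.mod n b < 0) :
    goAneg n b acc = goAneg (PySem.Int.floordiv n b + 1) b ((PySem.Int.mod n b - b) :: acc) := by
  rw [goAneg]; rw [dif_neg h]; exact dif_pos hr

theorem goAneg_step_nonneg (n b : Int) (acc : List Int) (h : ¬(n = 0 ∨ -2 < b))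
    (hr : ¬ PySem.Int.mod n b < 0) :
    goAneg n b acc = goAneg (PySem.Int.floordiv n b) b (PySem.Int.mod n b :: acc) := by
  rw [goAneg]; rw [dif_neg h]; exact dif_neg hr

theorem goB_stop (n base m : Int) (acc : List Int)
    (h : ¬((0 < n ∧ base = m ∧ 2 ≤ m) ∨ (n < 0 ∧ m = -base ∧ 2 ≤ base) ∨
           (n ≠ 0 ∧ m = -base ∧ base ≤ -2))) :
    goB n base m acc = acc := by rw [goB]; exact dif_neg h

theorem goB_step (n base m : Int) (acc : List Int)
    (h : (0 < n ∧ base = m ∧ 2 ≤ m) ∨ (n < 0 ∧ m = -base ∧ 2 ≤ base) ∨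
         (n ≠ 0 ∧ m = -base ∧ base ≤ -2)) :
    goB n base m acc =
      goB (PySem.Int.floordiv (n - PySem.Int.mod n m) base) base m
        (acc ++ [PySem.Int.mod n m]) := by
  rw [goB]; exact dif_pos h

-- the digit-weighted sum used by A, on a cons (via enumerate of reverse)
theorem sum_enum_reverse_cons (b d : Int) (l : List Int) :
    ((PySem.List.enumerate (d :: l).reverse 0).map (fun pd => pd.2 * b ^ pd.1.toNat)).sum
      = d * b ^ l.length + ((PySem.List.enumerate l.reverse 0).map (fun pd => pd.2 * b ^ pd.1.toNat)).sum := by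
  rw [List.reverse_cons, PySem.List.enumerate_append]
  simp [PySem.List.enumerate_cons, PySem.List.enumerate_nil, add_comm]

-- Horner's rule computes A's power sum
theorem horner_eq (b : Int) : ∀ (l : List Int) (a : Int),
    l.foldl (fun acc d => acc * b + d) a
      = a * b ^ l.length + ((PySem.List.enumerate l.reverse 0).map (fun pd => pd.2 * b ^ pd.1.toNat)).sum := by
  intro l
  induction l with
  | nil => simp [PySem.List.enumerate_nil]
  | cons d t ih =>
    intro a
    rw [List.foldl_cons, ih, sum_enum_reverse_cons]
    rw [List.length_cons]
    ring

-- an initial accumulator factors out of Horner's fold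
theorem foldl_horner_shift (b a : Int) (l : List Int) :
    l.foldl (fun acc d => acc * b + d) a
      = a * b ^ l.length + l.foldl (fun acc d => acc * b + d) 0 := by
  rw [horner_eq b l a, horner_eq b l 0]
  ring

-- B's divide-and-conquer evaluation equals Horner's fold (hence A's power sum)
theorem valDC_eq (b : Int) : ∀ (k : Nat) (ds : List Int), ds.length ≤ k →
    valDC ds b = ds.foldl (fun acc d => acc * b + d) 0 := by
  intro k
  induction k with
  | zero =>
    intro ds h
    have hnil : ds = [] := List.eq_nil_of_length_eq_zero (by omega)
    subst hnil
    rw [valDC]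
    simp
  | succ k ih =>
    intro ds h
    by_cases h1 : ds.length ≤ 1
    · rcases ds with _ | ⟨d, _ | ⟨e, t⟩⟩
      · rw [valDC]; simp
      · rw [valDC]; simp
      · simp at h1
    · rw [valDC, dif_neg h1,
          ih _ (by rw [List.length_take]; omega),
          ih _ (by rw [List.length_drop]; omega)]
      conv_rhs => rw [← List.take_append_drop (ds.length / 2) ds, List.foldl_append,
        foldl_horner_shift]
      rw [List.length_drop]

-- A's prepend loops factor through the empty accumulator
theorem goApos_acc : ∀ (k : Nat) (n b : Int), n.toNat ≤ k →
    ∀ acc, goApos n b acc = goApos n b [] ++ acc := by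
  intro k
  induction k with
  | zero =>
    intro n b hn acc
    rw [goApos_stop _ _ _ (by omega), goApos_stop _ _ _ (by omega)]
    simp
  | succ k ih =>
    intro n b hn acc
    by_cases h : n ≤ 0 ∨ b < 2
    · rw [goApos_stop _ _ _ h, goApos_stop _ _ _ h]
      simp
    · have hlt := pvPosStepLt n b h
      rw [goApos_step _ _ _ h, ih _ _ (by omega),
          goApos_step _ _ [] h, ih _ _ (by omega) [PySem.Int.mod n b]]
      simp

theorem goAneg_acc : ∀ (k : Nat) (n b : Int), 2 * n.natAbs + (if n < 0 then 1 else 0) ≤ k →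
    ∀ acc, goAneg n b acc = goAneg n b [] ++ acc := by
  intro k
  induction k with
  | zero =>
    intro n b hn acc
    rw [goAneg_stop _ _ _ (by omega), goAneg_stop _ _ _ (by omega)]
    simp
  | succ k ih =>
    intro n b hn acc
    by_cases h : n = 0 ∨ -2 < b
    · rw [goAneg_stop _ _ _ h, goAneg_stop _ _ _ h]
      simp
    · by_cases hr : PySem.Int.mod n b < 0
      · have hlt : 2 * (PySem.Int.floordiv n b + 1).natAbs +
            (if PySem.Int.floordiv n b + 1 < 0 then 1 else 0) < 2 * n.natAbs + (if n < 0 then 1 else 0) := by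
          refine pvNegMeasureLt n b (PySem.Int.floordiv n b + 1) (PySem.Int.mod n b - b)
            (by omega) (by omega) ?_ ?_ ?_
          · linear_combination -PySem.Int.floordiv_mul_add_mod n b
          · have := (PySem.Int.mod_neg_bounds (a := n) (show b < 0 by omega)).1
            omega
          · omega
        rw [goAneg_step_neg _ _ _ h hr, ih _ _ (by omega),
            goAneg_step_neg _ _ [] h hr, ih _ _ (by omega) [PySem.Int.mod n b - b]]
        simp
      · have hlt : 2 * (PySem.Int.floordiv n b).natAbs +
            (if PySem.Int.floordiv n b < 0 then 1 else 0) < 2 * n.natAbs + (if n < 0 then 1 else 0) := by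
          refine pvNegMeasureLt n b (PySem.Int.floordiv n b) (PySem.Int.mod n b)
            (by omega) (by omega) ?_ ?_ ?_
          · linear_combination -PySem.Int.floordiv_mul_add_mod n b
          · omega
          · have := (PySem.Int.mod_neg_bounds (a := n) (show b < 0 by omega)).2
            omega
        rw [goAneg_step_nonneg _ _ _ h hr, ih _ _ (by omega),
            goAneg_step_nonneg _ _ [] h hr, ih _ _ (by omega) [PySem.Int.mod n b]]
        simp

-- E1: positive base, non-negative n — B's loop builds the reverse of A's list
theorem goB_pos_eq : ∀ (k : Nat) (n b : Int), n.toNat ≤ k → 2 ≤ b → 0 ≤ n →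
    ∀ acc, goB n b b acc = acc ++ (goApos n b []).reverse := by
  intro k
  induction k with
  | zero =>
    intro n b hn hb h0 acc
    rw [goB_stop _ _ _ _ (by omega), goApos_stop _ _ _ (by omega)]
    simp
  | succ k ih =>
    intro n b hn hb h0 acc
    by_cases hz : n = 0
    · subst hz
      rw [goB_stop _ _ _ _ (by omega), goApos_stop _ _ _ (by omega)]
      simp
    · have hg : (0 < n ∧ b = b ∧ 2 ≤ b) ∨ (n < 0 ∧ b = -b ∧ 2 ≤ b) ∨
          (n ≠ 0 ∧ b = -b ∧ b ≤ -2) := Or.inl ⟨by omega, rfl, hb⟩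
      have hfd : 0 ≤ PySem.Int.floordiv n b := by
        rw [PySem.Int.floordiv_eq_ediv_of_pos (by omega)]
        exact Int.ediv_nonneg (by omega) (by omega)
      have hlt := pvPosStepLt n b (by omega)
      rw [goB_step _ _ _ _ hg, pvQsame n b (by omega),
          ih _ _ (by omega) hb hfd,
          goApos_step n b [] (by omega),
          goApos_acc ((PySem.Int.floordiv n b).toNat) _ _ (le_refl _) [PySem.Int.mod n b]]
      simp

-- E2: positive base, non-positive n with m = -b — B's digits are the negated reverse of
-- A's digits of -n
theorem goB_negnum_eq : ∀ (k : Nat) (n b : Int), n.natAbs ≤ k → 2 ≤ b → n ≤ 0 →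
    ∀ acc, goB n b (-b) acc = acc ++ ((goApos (-n) b []).map (fun x => -x)).reverse := by
  intro k
  induction k with
  | zero =>
    intro n b hn hb h0 acc
    have hz : n = 0 := by omega
    subst hz
    rw [goB_stop _ _ _ _ (by omega), goApos_stop _ _ _ (by omega)]
    simp
  | succ k ih =>
    intro n b hn hb h0 acc
    by_cases hz : n = 0
    · subst hz
      rw [goB_stop _ _ _ _ (by omega), goApos_stop _ _ _ (by omega)]
      simp
    · have hg : (0 < n ∧ b = -b ∧ 2 ≤ -b) ∨ (n < 0 ∧ -b = -b ∧ 2 ≤ b) ∨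
          (n ≠ 0 ∧ -b = -b ∧ b ≤ -2) := Or.inr (Or.inl ⟨by omega, rfl, hb⟩)
      -- the remainder by -b is minus the remainder of -n by b; quotients coincide
      have hmod : PySem.Int.mod n (-b) = -(PySem.Int.mod (-n) b) := by
        have := PySem.Int.mod_neg_neg (-n) b
        rwa [neg_neg] at this
      have hfd : PySem.Int.floordiv n (-b) = PySem.Int.floordiv (-n) b := by
        have := PySem.Int.floordiv_neg_neg (-n) b
        rwa [neg_neg] at this
      have hfd0 : 0 ≤ PySem.Int.floordiv (-n) b := by
        rw [PySem.Int.floordiv_eq_ediv_of_pos (by omega)]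
        exact Int.ediv_nonneg (by omega) (by omega)
      have hlt := pvPosStepLt (-n) b (by omega)
      rw [goB_step _ _ _ _ hg, pvQneg n b (by omega), hfd, hmod,
          ih _ _ (by omega) hb (by omega),
          goApos_step (-n) _ [] (by omega),
          goApos_acc ((PySem.Int.floordiv (-n) b).toNat) _ _ (le_refl _) [PySem.Int.mod (-n) b]]
      simp

-- E3: negative base with m = -b — B's loop builds the reverse of A's fixed-up loop
theorem goB_negbase_eq : ∀ (k : Nat) (n b : Int),
    2 * n.natAbs + (if n < 0 then 1 else 0) ≤ k → b ≤ -2 →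
    ∀ acc, goB n b (-b) acc = acc ++ (goAneg n b []).reverse := by
  intro k
  induction k with
  | zero =>
    intro n b hn hb acc
    have hz : n = 0 := by omega
    subst hz
    rw [goB_stop _ _ _ _ (by omega), goAneg_stop _ _ _ (by omega)]
    simp
  | succ k ih =>
    intro n b hn hb acc
    by_cases hz : n = 0
    · subst hz
      rw [goB_stop _ _ _ _ (by omega), goAneg_stop _ _ _ (by omega)]
      simp
    · have hg : (0 < n ∧ b = -b ∧ 2 ≤ -b) ∨ (n < 0 ∧ -b = -b ∧ 2 ≤ b) ∨
          (n ≠ 0 ∧ -b = -b ∧ b ≤ -2) := Or.inr (Or.inr ⟨hz, rfl, hb⟩)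
      have hA := PySem.Int.floordiv_mul_add_mod n b
      have hbd := PySem.Int.mod_neg_bounds (a := n) (show b < 0 by omega)
      by_cases hr : PySem.Int.mod n b < 0
      · -- A fixes the remainder up: digit = mod n b - b, quotient = floordiv n b + 1
        have hrep := pvRep n (-b) (-(PySem.Int.floordiv n b + 1)) (PySem.Int.mod n b - b)
          (Or.inl ⟨by omega, by omega, by omega⟩) (by linear_combination -hA)
        have hlt := pvNegMeasureLt n b (PySem.Int.floordiv n b + 1) (PySem.Int.mod n b - b)
          hb hz (by linear_combination -hA) (by omega) (by omega)
        rw [goB_step _ _ _ _ hg, pvQneg n b (by omega), hrep.1, hrep.2, neg_neg,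
            ih _ _ (by omega) hb,
            goAneg_step_neg _ _ [] (by omega) hr,
            goAneg_acc (2 * (PySem.Int.floordiv n b + 1).natAbs +
              (if PySem.Int.floordiv n b + 1 < 0 then 1 else 0)) _ _ (le_refl _)
              [PySem.Int.mod n b - b]]
        simp
      · -- remainder already in range (it is 0): digit = mod n b, quotient = floordiv n b
        have hrep := pvRep n (-b) (-(PySem.Int.floordiv n b)) (PySem.Int.mod n b)
          (Or.inl ⟨by omega, by omega, by omega⟩) (by linear_combination -hA)
        have hlt := pvNegMeasureLt n b (PySem.Int.floordiv n b) (PySem.Int.mod n b)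
          hb hz (by linear_combination -hA) (by omega) (by omega)
        rw [goB_step _ _ _ _ hg, pvQneg n b (by omega), hrep.1, hrep.2, neg_neg,
            ih _ _ (by omega) hb,
            goAneg_step_nonneg _ _ [] (by omega) hr,
            goAneg_acc (2 * (PySem.Int.floordiv n b).natAbs +
              (if PySem.Int.floordiv n b < 0 then 1 else 0)) _ _ (le_refl _)
              [PySem.Int.mod n b]]
        simp

-- ===== VERDICT (by name: the statement is the Claim_ definition above) =====
theorem convert_radix_spec : Claim_equal_convert_radix := by
  intro digits base_in base_out _
  unfold Spec_convert_radix convert_radix convert_radix_alt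
  rw [valDC_eq base_in digits.length digits (le_refl _), horner_eq]
  simp only [zero_mul, zero_add]
  set num := ((PySem.List.enumerate digits.reverse 0).map (fun pd => pd.2 * base_in ^ pd.1.toNat)).sum with hnum
  by_cases h0 : num = 0
  · simp [h0]
  · rw [if_neg h0, if_neg h0]
    by_cases h2 : 2 ≤ base_out
    · have habs : |base_out| = base_out := abs_of_pos (by omega)
      rw [if_pos h2, if_neg (by omega : ¬(-2 < base_out ∧ base_out < 2))]
      by_cases hp : 0 < num
      · rw [if_pos hp, if_neg (by omega : ¬(num < 0 ∧ 0 < base_out)), habs,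
            goB_pos_eq num.toNat num base_out (le_refl _) h2 (by omega)]
        simp
      · rw [if_neg hp, if_pos (by omega : num < 0 ∧ 0 < base_out), habs,
            goB_negnum_eq num.natAbs num base_out (le_refl _) h2 (by omega)]
        simp
    · rw [if_neg h2]
      by_cases hm : base_out ≤ -2
      · have habs : |base_out| = -base_out := abs_of_neg (by omega)
        rw [if_pos hm, if_neg (by omega : ¬(-2 < base_out ∧ base_out < 2)),
            if_neg (by omega : ¬(num < 0 ∧ 0 < base_out)), habs,
            goB_negbase_eq (2 * num.natAbs + (if num < 0 then 1 else 0)) num base_out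
              (le_refl _) hm]
        simp
      · rw [if_neg hm, if_pos (by omega : -2 < base_out ∧ base_out < 2)]
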